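-- pv_equiv track=rewrite | github.com/s1k0ra/Stabilizer_Simulator | pauli_tools.py | valid_pauli
-- ===== SOURCE A (Python) =====
-- PAULIS = ["I", "X", "Y", "Z"]
--
-- def valid_pauli(pauli):
--     for i,p in enumerate(pauli):
--         if(p in PAULIS):
--             continue
--         if(p == "-" or p == "i" and i < len(pauli) - 1):
--             continue
--         return False
--     return True
-- ===== SOURCE B (Python) =====
-- def valid_pauli(pauli):
--     return set(pauli) <= set("IXYZ-i") and not pauli.endswith("i")
-- ===== Notes on version B (the rewrite author's own statement) =====
-- stated objective: idiomatic
-- what changed: Replaced the index-tracking per-character scan with a whole-string set-subset test against the allowed alphabet plus a single last-character boundary check.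
import Mathlib
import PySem

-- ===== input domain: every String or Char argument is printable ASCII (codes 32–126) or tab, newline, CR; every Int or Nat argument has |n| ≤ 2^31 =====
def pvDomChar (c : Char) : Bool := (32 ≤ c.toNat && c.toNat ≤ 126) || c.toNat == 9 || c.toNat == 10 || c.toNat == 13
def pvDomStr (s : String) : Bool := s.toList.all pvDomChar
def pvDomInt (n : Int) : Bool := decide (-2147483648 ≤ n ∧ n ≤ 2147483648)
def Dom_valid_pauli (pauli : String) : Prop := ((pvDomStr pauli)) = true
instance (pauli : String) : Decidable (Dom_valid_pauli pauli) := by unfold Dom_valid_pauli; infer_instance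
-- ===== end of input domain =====

-- B replaces A's index-tracking per-character scan by a set-subset test plus one endswith check (idiomatic, same cost).

-- ===== PORT A =====
def PAULIS : List Char := ['I', 'X', 'Y', 'Z']

def validA_go (n : Int) : List (Int × Char) → Bool
  | [] => true
  | (i, p) :: rest =>
    if p ∈ PAULIS then validA_go n rest
    else if p = '-' ∨ (p = 'i' ∧ i < n - 1) then validA_go n rest
    else false

def valid_pauli (pauli : String) : Bool :=
  validA_go (PySem.Str.len pauli) (PySem.List.enumerate pauli.toList 0)

-- ===== PORT B =====
def valid_pauli_alt (pauli : String) : Bool :=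
  PySem.Set.issubset (PySem.Set.ofList pauli.toList) (PySem.Set.ofList "IXYZ-i".toList)
    && !(PySem.Str.endswith pauli "i")

-- ===== PRECONDITION & SPEC =====
def Spec_valid_pauli (pauli : String) (out : Bool) : Prop := out = valid_pauli_alt pauli
instance (pauli : String) (out : Bool) : Decidable (Spec_valid_pauli pauli out) := by unfold Spec_valid_pauli; infer_instance

-- ===== CLAIM (what is proved, stated in full; the proofs are below) =====
def Claim_equal_valid_pauli : Prop := ∀ (pauli : String), Dom_valid_pauli pauli → Spec_valid_pauli pauli (valid_pauli pauli)

-- ===== LEMMAS AND PROOFS =====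

lemma validA_go_eq (cs : List Char) (s n : Int) (h : s + cs.length = n) :
    validA_go n (PySem.List.enumerate cs s)
      = (cs.all (fun c => c ∈ ['I','X','Y','Z','-','i']) && !(cs.getLast? == some 'i')) := by
  induction cs generalizing s with
  | nil => simp [PySem.List.enumerate, validA_go]
  | cons c cs ih =>
    rw [PySem.List.enumerate_cons]
    simp only [List.length_cons] at h
    push_cast at h
    cases cs with
    | nil =>
      simp only [List.length_nil, Nat.cast_zero] at h
      have hs : ¬ s < n - 1 := by omega
      simp only [validA_go, PAULIS, PySem.List.enumerate_nil]
      by_cases h1 : c ∈ (['I','X','Y','Z'] : List Char)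
      · rw [if_pos h1]
        fin_cases h1 <;> simp
      · rw [if_neg h1]
        simp only [List.mem_cons, List.not_mem_nil, or_false] at h1
        push Not at h1
        by_cases h2 : c = '-'
        · subst h2; simp
        · by_cases h3 : c = 'i'
          · subst h3
            rw [if_neg (by tauto)]
            simp
          · rw [if_neg (by tauto)]
            simp; tauto
    | cons d ds =>
      have hrest := ih (s + 1) (by omega)
      simp only [List.length_cons] at h
      push_cast at h
      have hs : s < n - 1 := by omega
      simp only [validA_go, PAULIS]
      have hlast : (c :: d :: ds).getLast? = (d :: ds).getLast? := by
        simp [List.getLast?_cons_cons]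
      rw [hlast]
      by_cases h1 : c ∈ (['I','X','Y','Z'] : List Char)
      · rw [if_pos h1, hrest]
        fin_cases h1 <;> simp
      · rw [if_neg h1]
        simp only [List.mem_cons, List.not_mem_nil, or_false] at h1
        push Not at h1
        by_cases h2 : c = '-'
        · subst h2
          rw [if_pos (Or.inl rfl), hrest]
          simp
        · by_cases h3 : c = 'i'
          · subst h3
            rw [if_pos (Or.inr ⟨rfl, hs⟩), hrest]
            simp
          · rw [if_neg (by tauto)]
            simp; tauto

lemma alt_eq (pauli : String) :
    valid_pauli_alt pauli
      = (pauli.toList.all (fun c => c ∈ ['I','X','Y','Z','-','i'])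
          && !(pauli.toList.getLast? == some 'i')) := by
  unfold valid_pauli_alt
  have h1 : PySem.Set.issubset (PySem.Set.ofList pauli.toList) (PySem.Set.ofList "IXYZ-i".toList)
      = pauli.toList.all (fun c => c ∈ (['I','X','Y','Z','-','i'] : List Char)) := by
    rw [Bool.eq_iff_iff, PySem.Set.issubset_iff, List.all_eq_true]
    simp [PySem.Set.mem_ofList]
  have h2 : PySem.Str.endswith pauli "i" = (pauli.toList.getLast? == some 'i') := by
    rw [Bool.eq_iff_iff, PySem.Str.endswith_eq, PySem.Chars.endswith_iff, beq_iff_eq,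
        List.getLast?_eq_some_iff]
    show ("i".toList <:+ pauli.toList) ↔ _
    constructor
    · rintro ⟨t, ht⟩; exact ⟨t, ht.symm⟩
    · rintro ⟨t, ht⟩; exact ⟨t, ht.symm⟩
  rw [h1, h2]

-- ===== VERDICT (by name: the statement is the Claim_ definition above) =====
theorem valid_pauli_spec : Claim_equal_valid_pauli := by
  intro pauli _
  unfold Spec_valid_pauli valid_pauli
  rw [alt_eq, validA_go_eq pauli.toList 0 (PySem.Str.len pauli) (by simp [PySem.Str.len_eq])]
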